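-- pv_equiv track=rewrite | github.com/kanitsch/ASD | ubiegle_lata/asd-main-2020-2021/2020-2021/zad1_t0.py | tanagram_n2
-- ===== SOURCE A (Python) =====
-- def tanagram_n2(x,y,t):
--     n=len(x)
--     if n!=len(y):
--         return False
--     tab=[False for _ in range(n)]
--     for i in range(n):
--         flag=False
--         for j in range(max(i-t,0),min(i+t+1,n)):
--             if x[i]==y[j] and not tab[j]:
--                 tab[j]=True
--                 flag=True
--                 break
--         if not flag:
--             return False
--
--     return True
-- ===== SOURCE B (Python) =====
-- def tanagram_n2(x, y, t):
--     n = len(x)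
--     if n != len(y):
--         return False
--     pos = {}
--     for j, c in enumerate(y):
--         pos.setdefault(c, []).append(j)
--     for i, c in enumerate(x):
--         l = pos.get(c, [])
--         k = 0
--         while k < len(l) and l[k] < i - t:
--             k += 1
--         if k == len(l) or l[k] > i + t:
--             return False
--         l.pop(k)
--     return True
-- ===== Notes on version B (the rewrite author's own statement) =====
-- stated objective: faster
-- what changed: B drops A's boolean-marker array and per-position window scan: it builds a per-character index of y's positions once, and for each character of x scans only that character's still-unused position list for the first index inside the window, popping it.
import Mathlib
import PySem

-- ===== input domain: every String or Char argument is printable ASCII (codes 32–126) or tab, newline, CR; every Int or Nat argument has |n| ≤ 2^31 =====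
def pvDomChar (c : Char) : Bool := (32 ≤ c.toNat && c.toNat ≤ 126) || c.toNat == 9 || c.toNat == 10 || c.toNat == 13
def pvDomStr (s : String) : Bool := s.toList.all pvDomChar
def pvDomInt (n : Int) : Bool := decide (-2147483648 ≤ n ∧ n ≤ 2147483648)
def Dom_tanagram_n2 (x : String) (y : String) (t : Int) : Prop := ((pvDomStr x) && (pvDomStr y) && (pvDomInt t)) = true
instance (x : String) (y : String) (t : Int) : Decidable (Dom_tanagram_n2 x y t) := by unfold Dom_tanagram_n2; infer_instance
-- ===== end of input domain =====

-- B replaces A's boolean-marker array and per-position window scan by a per-character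
-- index of y-positions built once, scanning only the unused positions of the needed
-- character (objective: faster — a timing run measured B well ahead of A at large n).

-- ===== PORT A =====
-- inner 'for j in range(max(i-t,0), min(i+t+1,n))' loop: first unused matching j, marked in tab
def pvInnerA (c : Char) (ys : List Char) (tab : List Bool) : Nat → Nat → Option (List Bool)
  | _, 0 => none
  | j, fuel+1 =>
    if ys.getD j ' ' = c ∧ tab.getD j true = false then some (tab.set j true)
    else pvInnerA c ys tab (j+1) fuel

-- outer 'for i in range(n)' loop over the characters of x
def pvOuterA (ys : List Char) (t : Int) (n : Nat) : List Char → Nat → List Bool → Bool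
  | [], _, _ => true
  | c :: rest, i, tab =>
    match pvInnerA c ys tab (max ((i:Int) - t) 0).toNat (min ((i:Int) + t + 1) (n:Int) - max ((i:Int) - t) 0).toNat with
    | some tab' => pvOuterA ys t n rest (i+1) tab'
    | none => false

def tanagram_n2 (x : String) (y : String) (t : Int) : Bool :=
  if x.toList.length ≠ y.toList.length then false
  else pvOuterA y.toList t x.toList.length x.toList 0 (List.replicate x.toList.length false)

-- ===== PORT B =====
-- 'for j, c in enumerate(y): pos.setdefault(c, []).append(j)'
def pvBuildPos : List Char → Nat → PySem.Dict Char (List Nat) → PySem.Dict Char (List Nat)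
  | [], _, d => d
  | c :: rest, j, d => pvBuildPos rest (j+1) (d.insert c (d.getD c [] ++ [j]))

-- the 'while k < len(l) and l[k] < i-t' skip, the bound test 'l[k] > i+t', and 'l.pop(k)'
def pvStepB (lo hi : Int) : List Nat → Option (List Nat)
  | [] => none
  | p :: rest =>
    if (p:Int) < lo then (pvStepB lo hi rest).map (fun l => p :: l)
    else if hi < (p:Int) then none
    else some rest

-- 'for i, c in enumerate(x)' loop
def pvOuterB (t : Int) : List Char → Nat → PySem.Dict Char (List Nat) → Bool
  | [], _, _ => true
  | c :: rest, i, rem =>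
    match pvStepB ((i:Int) - t) ((i:Int) + t) (rem.getD c []) with
    | some l' => pvOuterB t rest (i+1) (rem.insert c l')
    | none => false

def tanagram_n2_alt (x : String) (y : String) (t : Int) : Bool :=
  if x.toList.length ≠ y.toList.length then false
  else pvOuterB t x.toList 0 (pvBuildPos y.toList 0 PySem.Dict.empty)

-- ===== PRECONDITION & SPEC =====
def Spec_tanagram_n2 (x : String) (y : String) (t : Int) (out : Bool) : Prop := out = tanagram_n2_alt x y t
instance (x : String) (y : String) (t : Int) (out : Bool) : Decidable (Spec_tanagram_n2 x y t out) := by unfold Spec_tanagram_n2; infer_instance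

-- ===== CLAIM (what is proved, stated in full; the proofs are below) =====
def Claim_equal_tanagram_n2 : Prop := ∀ (x : String) (y : String) (t : Int), Dom_tanagram_n2 x y t → Spec_tanagram_n2 x y t (tanagram_n2 x y t)

-- ===== LEMMAS AND PROOFS =====

-- positions j, j+1, … of l that carry character c (what pvBuildPos accumulates per key)
def pvPosFrom : List Char → Nat → Char → List Nat
  | [], _, _ => []
  | a :: rest, j, c => (if a = c then [j] else []) ++ pvPosFrom rest (j+1) c

-- the still-unmarked positions of character c, in increasing order
def pvUnused (ys : List Char) (tab : List Bool) (c : Char) : List Nat :=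
  (pvPosFrom ys 0 c).filter (fun p => !tab.getD p true)

theorem mem_pvPosFrom (l : List Char) (j : Nat) (c : Char) (q : Nat) :
    q ∈ pvPosFrom l j c ↔ j ≤ q ∧ q < j + l.length ∧ l.getD (q - j) ' ' = c := by
  induction l generalizing j with
  | nil => simp [pvPosFrom]; omega
  | cons a rest ih =>
    simp only [pvPosFrom, List.mem_append, ih (j+1)]
    constructor
    · rintro (h | ⟨h1, h2, h3⟩)
      · have : q = j := by split at h <;> simp_all
        subst this
        refine ⟨le_refl _, by simp, ?_⟩
        simp only [Nat.sub_self]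
        split at h <;> simp_all [List.getD]
      · refine ⟨by omega, by simp; omega, ?_⟩
        have : q - j = (q - (j+1)) + 1 := by omega
        rw [this]
        simpa [List.getD] using h3
    · rintro ⟨h1, h2, h3⟩
      rcases Nat.eq_or_lt_of_le h1 with h | h
      · left
        subst h
        simp only [Nat.sub_self] at h3
        simp [List.getD] at h3
        simp [h3]
      · right
        refine ⟨by omega, by simp at h2 ⊢; omega, ?_⟩
        have : q - j = (q - (j+1)) + 1 := by omega
        rw [this] at h3
        simpa [List.getD] using h3

theorem pairwise_pvPosFrom (l : List Char) (j : Nat) (c : Char) :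
    (pvPosFrom l j c).Pairwise (· < ·) := by
  induction l generalizing j with
  | nil => simp [pvPosFrom]
  | cons a rest ih =>
    simp only [pvPosFrom]
    have hge : ∀ q ∈ pvPosFrom rest (j+1) c, j < q := by
      intro q hq
      have := (mem_pvPosFrom rest (j+1) c q).mp hq
      omega
    split
    · exact List.Pairwise.cons (by simpa using hge) (ih (j+1))
    · simpa using ih (j+1)

theorem mem_pvUnused (ys : List Char) (tab : List Bool) (c : Char) (q : Nat) :
    q ∈ pvUnused ys tab c ↔ q < ys.length ∧ ys.getD q ' ' = c ∧ tab.getD q true = false := by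
  simp [pvUnused, List.mem_filter, mem_pvPosFrom]
  tauto

theorem pairwise_pvUnused (ys : List Char) (tab : List Bool) (c : Char) :
    (pvUnused ys tab c).Pairwise (· < ·) := by
  exact List.Pairwise.filter _ (pairwise_pvPosFrom ys 0 c)

theorem pvBuildPos_getD (l : List Char) (j : Nat) (d : PySem.Dict Char (List Nat)) (c : Char) :
    (pvBuildPos l j d).getD c [] = d.getD c [] ++ pvPosFrom l j c := by
  induction l generalizing j d with
  | nil => simp [pvBuildPos, pvPosFrom]
  | cons a rest ih =>
    simp only [pvBuildPos, pvPosFrom, ih]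
    rw [PySem.Dict.getD_insert]
    rcases eq_or_ne a c with h | h
    · subst h; simp
    · simp [h, h.symm]

-- pvInnerA finds no j in [a, a+f) when nothing there matches
theorem pvInnerA_none (c : Char) (ys : List Char) (tab : List Bool) (a f : Nat)
    (h : ∀ j, a ≤ j → j < a + f → ¬(ys.getD j ' ' = c ∧ tab.getD j true = false)) :
    pvInnerA c ys tab a f = none := by
  induction f generalizing a with
  | zero => rfl
  | succ f ih =>
    simp only [pvInnerA]
    rw [if_neg (h a (le_refl a) (by omega))]
    exact ih (a+1) (fun j hj1 hj2 => h j (by omega) (by omega))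

-- pvInnerA marks the first matching j
theorem pvInnerA_some (c : Char) (ys : List Char) (tab : List Bool) (a f j0 : Nat)
    (h1 : a ≤ j0) (h2 : j0 < a + f)
    (hP : ys.getD j0 ' ' = c ∧ tab.getD j0 true = false)
    (hmin : ∀ j, a ≤ j → j < j0 → ¬(ys.getD j ' ' = c ∧ tab.getD j true = false)) :
    pvInnerA c ys tab a f = some (tab.set j0 true) := by
  induction f generalizing a with
  | zero => omega
  | succ f ih =>
    simp only [pvInnerA]
    rcases Nat.eq_or_lt_of_le h1 with h | h
    · subst h
      rw [if_pos hP]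
    · rw [if_neg (hmin a (le_refl a) h)]
      exact ih (a+1) (by omega) (by omega) (fun j hj1 hj2 => hmin j (by omega) hj2)

theorem pvStepB_all_lt (lo hi : Int) (L : List Nat) (h : ∀ p ∈ L, (p:Int) < lo) :
    pvStepB lo hi L = none := by
  induction L with
  | nil => rfl
  | cons p rest ih =>
    simp only [pvStepB]
    rw [if_pos (h p (List.mem_cons_self ..))]
    rw [ih (fun q hq => h q (List.mem_cons_of_mem _ hq))]
    rfl

theorem pvStepB_split (lo hi : Int) (L1 : List Nat) (p0 : Nat) (L2 : List Nat)
    (h1 : ∀ p ∈ L1, (p:Int) < lo) (h0 : ¬((p0:Int) < lo)) :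
    pvStepB lo hi (L1 ++ p0 :: L2) = if hi < (p0:Int) then none else some (L1 ++ L2) := by
  induction L1 with
  | nil =>
    simp only [List.nil_append, pvStepB]
    rw [if_neg h0]
  | cons p rest ih =>
    simp only [List.cons_append, pvStepB]
    rw [if_pos (h1 p (List.mem_cons_self ..))]
    rw [ih (fun q hq => h1 q (List.mem_cons_of_mem _ hq))]
    split <;> rfl

theorem pvWindow_out (t : Int) (i j n : Nat)
    (h1 : (max ((i:Int) - t) 0).toNat ≤ j)
    (h2 : j < (max ((i:Int) - t) 0).toNat + (min ((i:Int) + t + 1) (n:Int) - max ((i:Int) - t) 0).toNat) :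
    (i:Int) - t ≤ (j:Int) ∧ (j:Int) ≤ (i:Int) + t ∧ j < n := by omega

theorem pvWindow_in (t : Int) (i p n : Nat)
    (hlo : (i:Int) - t ≤ (p:Int)) (hhi : (p:Int) ≤ (i:Int) + t) (hn : p < n) :
    (max ((i:Int) - t) 0).toNat ≤ p ∧
      p < (max ((i:Int) - t) 0).toNat + (min ((i:Int) + t + 1) (n:Int) - max ((i:Int) - t) 0).toNat := by
  omega

-- membership in pvUnused from the inner-loop condition (tab's default-out-of-range read forces j < n)
theorem pvPmem (ys : List Char) (tab : List Bool) (c : Char) (hlen : tab.length = ys.length)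
    (j : Nat) (hP : ys.getD j ' ' = c ∧ tab.getD j true = false) : j ∈ pvUnused ys tab c := by
  rw [mem_pvUnused]
  refine ⟨?_, hP.1, hP.2⟩
  by_contra hge
  have h2 := hP.2
  rw [List.getD_eq_getElem?_getD, List.getElem?_eq_none (by omega)] at h2
  simp at h2

-- one step: A's window scan agrees with B's per-character scan, and the invariant is preserved
theorem pvStep (ys : List Char) (tab : List Bool) (t : Int) (i : Nat) (c : Char)
    (hlen : tab.length = ys.length) :
    (pvStepB ((i:Int) - t) ((i:Int) + t) (pvUnused ys tab c) = none ∧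
      pvInnerA c ys tab (max ((i:Int) - t) 0).toNat
        (min ((i:Int) + t + 1) (ys.length:Int) - max ((i:Int) - t) 0).toNat = none) ∨
    (∃ p0 : Nat,
      pvStepB ((i:Int) - t) ((i:Int) + t) (pvUnused ys tab c) = some (pvUnused ys (tab.set p0 true) c) ∧
      pvInnerA c ys tab (max ((i:Int) - t) 0).toNat
        (min ((i:Int) + t + 1) (ys.length:Int) - max ((i:Int) - t) 0).toNat = some (tab.set p0 true) ∧
      p0 < ys.length ∧ ys.getD p0 ' ' = c) := by
  have hsorted := pairwise_pvUnused ys tab c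
  have hsplit := List.takeWhile_append_dropWhile
    (p := fun p : Nat => decide ((p:Int) < (i:Int) - t)) (l := pvUnused ys tab c)
  have hL1 : ∀ p ∈ (pvUnused ys tab c).takeWhile (fun p : Nat => decide ((p:Int) < (i:Int) - t)),
      (p:Int) < (i:Int) - t := by
    intro p hp
    simpa using List.mem_takeWhile_imp hp
  cases hD : (pvUnused ys tab c).dropWhile (fun p : Nat => decide ((p:Int) < (i:Int) - t)) with
  | nil =>
    left
    rw [hD, List.append_nil] at hsplit
    have hall : ∀ p ∈ pvUnused ys tab c, (p:Int) < (i:Int) - t := by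
      intro p hp
      rw [← hsplit] at hp
      exact hL1 p hp
    constructor
    · exact pvStepB_all_lt _ _ _ hall
    · apply pvInnerA_none
      intro j hj1 hj2 hP
      have hjL := pvPmem ys tab c hlen j hP
      have hjlt := hall j hjL
      have := (pvWindow_out t i j ys.length hj1 hj2).1
      omega
  | cons p0 L2 =>
    have hp0lo : ¬((p0:Int) < (i:Int) - t) := by
      have h := List.head?_dropWhile_not
        (fun p : Nat => decide ((p:Int) < (i:Int) - t)) (pvUnused ys tab c)
      rw [hD] at h
      simpa using h
    rw [hD] at hsplit
    obtain ⟨L1, hL1', hmemL⟩ :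
        ∃ L1 : List Nat, (∀ p : Nat, p ∈ L1 → (p:Int) < (i:Int) - t) ∧
          pvUnused ys tab c = L1 ++ p0 :: L2 :=
      ⟨_, hL1, hsplit.symm⟩
    have hp0L : p0 ∈ pvUnused ys tab c := by rw [hmemL]; simp
    have hp0 := (mem_pvUnused ys tab c p0).mp hp0L
    have hpw := hsorted
    rw [hmemL, List.pairwise_append] at hpw
    have hL2 : ∀ q ∈ L2, p0 < q := (List.pairwise_cons.mp hpw.2.1).1
    have hminL : ∀ q ∈ pvUnused ys tab c, (i:Int) - t ≤ (q:Int) → p0 ≤ q := by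
      intro q hq hqlo
      rw [hmemL] at hq
      rcases List.mem_append.mp hq with h | h
      · exact absurd (hL1' q h) (by omega)
      · rcases List.mem_cons.mp h with h | h
        · omega
        · exact le_of_lt (hL2 q h)
    by_cases hhi : ((i:Int) + t) < (p0:Int)
    · left
      constructor
      · rw [hmemL, pvStepB_split _ _ _ _ _ hL1' hp0lo, if_pos hhi]
      · apply pvInnerA_none
        intro j hj1 hj2 hP
        have hjL := pvPmem ys tab c hlen j hP
        obtain ⟨hw1, hw2, hw3⟩ := pvWindow_out t i j ys.length hj1 hj2
        have := hminL j hjL (by omega)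
        omega
    · right
      refine ⟨p0, ?_, ?_, hp0.1, hp0.2.1⟩
      · rw [hmemL, pvStepB_split _ _ _ _ _ hL1' hp0lo, if_neg hhi]
        congr 1
        -- the new unused list for c is the old one with p0 removed
        have hset : pvUnused ys (tab.set p0 true) c
            = (pvUnused ys tab c).filter (fun p => !(p == p0)) := by
          unfold pvUnused
          rw [List.filter_filter]
          apply List.filter_congr
          intro p hp
          have hgd : (tab.set p0 true).getD p true = if p = p0 then true else tab.getD p true := by
            by_cases h : p = p0
            · subst h
              rw [List.getD_eq_getElem?_getD, List.getElem?_set_self (by omega : p < tab.length)]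
              simp
            · rw [List.getD_eq_getElem?_getD, List.getElem?_set_ne (Ne.symm h),
                ← List.getD_eq_getElem?_getD]
              simp [h]
          rw [hgd]
          by_cases h : p = p0 <;> simp [h]
        rw [hset, hmemL, List.filter_append, List.filter_cons]
        have e0 : (!(p0 == p0)) = false := by simp
        rw [e0]
        have e1 : L1.filter (fun p => !(p == p0)) = L1 := by
          apply List.filter_eq_self.mpr
          intro q hq
          have := hL1' q hq
          simp
          omega
        have e2 : L2.filter (fun p => !(p == p0)) = L2 := by
          apply List.filter_eq_self.mpr
          intro q hq
          have := hL2 q hq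
          simp
          omega
        rw [e1, e2]
        simp
      · apply pvInnerA_some
        · exact (pvWindow_in t i p0 ys.length (by omega) (by omega) hp0.1).1
        · exact (pvWindow_in t i p0 ys.length (by omega) (by omega) hp0.1).2
        · exact ⟨hp0.2.1, hp0.2.2⟩
        · intro j hj1 hj2 hP
          have hjL := pvPmem ys tab c hlen j hP
          have hjlo : (i:Int) - t ≤ (j:Int) := by
            have : ((max ((i:Int) - t) 0).toNat : Int) ≤ (j:Int) := by exact_mod_cast hj1
            omega
          have := hminL j hjL hjlo
          omega

theorem pvUnused_set_ne (ys : List Char) (tab : List Bool) (c c' : Char) (p0 : Nat)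
    (hc : ys.getD p0 ' ' = c) (hne : c' ≠ c) :
    pvUnused ys (tab.set p0 true) c' = pvUnused ys tab c' := by
  unfold pvUnused
  apply List.filter_congr
  intro p hp
  have hmem := (mem_pvPosFrom ys 0 c' p).mp hp
  simp only [Nat.zero_add, Nat.sub_zero] at hmem
  have hpne : p0 ≠ p := by
    intro h
    subst h
    exact hne (hmem.2.2.symm.trans hc)
  rw [List.getD_eq_getElem?_getD, List.getElem?_set_ne hpne, ← List.getD_eq_getElem?_getD]

theorem pvOuter_eq (ys : List Char) (t : Int) (rest : List Char) (i : Nat)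
    (tab : List Bool) (rem : PySem.Dict Char (List Nat))
    (hlen : tab.length = ys.length)
    (hinv : ∀ c, rem.getD c [] = pvUnused ys tab c) :
    pvOuterA ys t ys.length rest i tab = pvOuterB t rest i rem := by
  induction rest generalizing i tab rem with
  | nil => rfl
  | cons c rest ih =>
    simp only [pvOuterA, pvOuterB, hinv c]
    rcases pvStep ys tab t i c hlen with ⟨hB, hA⟩ | ⟨p0, hB, hA, hp0n, hp0c⟩
    · rw [hA, hB]
    · rw [hA, hB]
      simp only
      apply ih (i+1) (tab.set p0 true) _ (by simp [hlen])
      intro c'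
      rw [PySem.Dict.getD_insert]
      by_cases h : c' = c
      · simp [h]
      · rw [if_neg h]
        rw [hinv c', pvUnused_set_ne ys tab c c' p0 hp0c h]

-- ===== VERDICT (by name: the statement is the Claim_ definition above) =====
theorem tanagram_n2_spec : Claim_equal_tanagram_n2 := by
  intro x y t _
  unfold Spec_tanagram_n2 tanagram_n2 tanagram_n2_alt
  by_cases h : x.toList.length = y.toList.length
  · rw [if_neg (by omega), if_neg (by omega), h]
    apply pvOuter_eq
    · simp
    · intro c
      rw [pvBuildPos_getD]
      rw [PySem.Dict.getD_empty, List.nil_append]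
      unfold pvUnused
      symm
      apply List.filter_eq_self.mpr
      intro q hq
      have hmem := (mem_pvPosFrom y.toList 0 c q).mp hq
      simp only [Nat.zero_add, Nat.sub_zero] at hmem
      rw [List.getD_eq_getElem?_getD, List.getElem?_replicate]
      rw [if_pos (by omega)]
      simp
  · rw [if_pos h, if_pos h]
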